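-- pv_equiv track=rewrite | github.com/v-phoenix/py_solutions | problems/algos/ds/priority_queue.py | heap_increase_key
-- ===== SOURCE A (Python) =====
-- def heap_increase_key(A,i,key):
--     if A[i] > key:
--         raise ValueError('key is less than the current key!');
--
--     A[i] = key;
--
--     while i > 0 and (A[i//3] < A[i]):
--         temp = A[i//3]
--         A[i//3] = A[i]
--         A[i] = temp;
--         i = i // 3
--
--     return A;
-- ===== SOURCE B (Python) =====
-- def heap_increase_key(A, i, key):
--     if A[i] > key:
--         raise ValueError('key is less than the current key!')
--     # stage 1: materialise the ancestor chain i, i//3, ..., 0 (just [i] if i <= 0)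
--     chain = [i]
--     while chain[-1] > 0:
--         chain.append(chain[-1] // 3)
--     # stage 2: count how many ancestors are strictly smaller than key
--     k = 0
--     while k + 1 < len(chain) and A[chain[k + 1]] < key:
--         k += 1
--     # stage 3: shift those ancestors down one level and drop key at the hole
--     for t in range(k):
--         A[chain[t]] = A[chain[t + 1]]
--     A[chain[k]] = key
--     return A
-- ===== Notes on version B (the rewrite author's own statement) =====
-- stated objective: alternative
-- what changed: Replaces the interleaved compare-and-swap while loop with three staged passes: first materialise the whole ancestor chain i, i//3, ..., 0 as a list, then count how many ancestors are smaller than key by scanning that chain against the untouched array, then perform all the downward shifts in one bulk pass and write key once at the hole.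
import Mathlib
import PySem

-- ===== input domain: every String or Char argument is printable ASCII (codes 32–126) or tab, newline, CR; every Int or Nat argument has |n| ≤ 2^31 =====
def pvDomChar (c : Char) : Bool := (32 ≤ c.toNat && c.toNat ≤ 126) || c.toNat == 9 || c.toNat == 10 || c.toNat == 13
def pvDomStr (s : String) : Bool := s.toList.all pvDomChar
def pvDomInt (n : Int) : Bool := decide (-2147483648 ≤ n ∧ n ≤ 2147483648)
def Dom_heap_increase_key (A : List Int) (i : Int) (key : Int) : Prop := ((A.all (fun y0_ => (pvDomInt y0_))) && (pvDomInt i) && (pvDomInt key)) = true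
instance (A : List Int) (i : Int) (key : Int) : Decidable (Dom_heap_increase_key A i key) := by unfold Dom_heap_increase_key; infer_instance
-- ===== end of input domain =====

-- B replaces A's interleaved compare-and-swap sift-up loop by three staged passes
-- (materialise the ancestor chain, count the ancestors smaller than key, bulk-shift
-- them and write key once); A and B mutate A in place in Python — the equivalence
-- proved here is about the returned list value.

lemma pvFloordiv3_lt (i : Int) (h : 0 < i) : (PySem.Int.floordiv i 3).toNat < i.toNat := by
  rw [PySem.Int.floordiv_eq_ediv_of_pos (by omega)]
  omega

-- ===== PORT A =====
-- the while loop of A: swap A[i//3] and A[i] while the parent is smaller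
def heapLoopA (A : List Int) (i : Int) : List Int :=
  if h : 0 < i then
    let p := PySem.Int.floordiv i 3
    if PySem.List.pyGetD A p 0 < PySem.List.pyGetD A i 0 then
      heapLoopA
        (PySem.List.pySetD (PySem.List.pySetD A p (PySem.List.pyGetD A i 0)) i
          (PySem.List.pyGetD A p 0)) p
    else A
  else A
termination_by i.toNat
decreasing_by exact pvFloordiv3_lt i h

def heap_increase_key (A : List Int) (i : Int) (key : Int) : List Int :=
  match PySem.List.pyGet? A i with
  | none => A        -- IndexError: outside Pre_
  | some v =>
    if v > key then A  -- ValueError: outside Pre_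
    else heapLoopA (PySem.List.pySetD A i key) i

-- ===== PORT B =====
-- stage 1 of B: chain = [i]; while chain[-1] > 0: chain.append(chain[-1]//3)
def pvChain (j : Int) : List Int :=
  if h : 0 < j then j :: pvChain (PySem.Int.floordiv j 3) else [j]
termination_by j.toNat
decreasing_by exact pvFloordiv3_lt j h

-- stage 2 of B: k = 0; while k+1 < len(chain) and A[chain[k+1]] < key: k += 1
-- (transcribed as recursion consuming the chain; the result is the final k)
def pvCut (A : List Int) (chain : List Int) (key : Int) : Nat :=
  match chain with
  | _ :: c1 :: rest =>
      if PySem.List.pyGetD A c1 0 < key then pvCut A (c1 :: rest) key + 1 else 0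
  | _ => 0

-- stage 3 of B: for t in range(k): A[chain[t]] = A[chain[t+1]]
def pvShift (A : List Int) (chain : List Int) (k : Nat) : List Int :=
  match k, chain with
  | Nat.succ k', c0 :: c1 :: rest =>
      pvShift (PySem.List.pySetD A c0 (PySem.List.pyGetD A c1 0)) (c1 :: rest) k'
  | _, _ => A

def heap_increase_key_alt (A : List Int) (i : Int) (key : Int) : List Int :=
  match PySem.List.pyGet? A i with
  | none => A        -- IndexError: outside Pre_
  | some v =>
    if v > key then A  -- ValueError: outside Pre_
    else
      let chain := pvChain i
      let k := pvCut A chain key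
      PySem.List.pySetD (pvShift A chain k) (PySem.List.pyGetD chain ((k : Nat) : Int) 0) key

-- ===== PRECONDITION & SPEC =====
-- Pre_ excludes exactly the inputs on which A raises: an out-of-range index i
-- (IndexError) and A[i] > key (ValueError).
def Pre_heap_increase_key (A : List Int) (i : Int) (key : Int) : Prop :=
  PySem.Raise.InRange A.length i ∧ PySem.List.pyGetD A i 0 ≤ key
instance (A : List Int) (i : Int) (key : Int) : Decidable (Pre_heap_increase_key A i key) := by
  unfold Pre_heap_increase_key; infer_instance

def pvWitness_heap_increase_key : List Int × Int × Int := ([5, 1, 2, 3], 3, 9)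

def Spec_heap_increase_key (A : List Int) (i : Int) (key : Int) (out : List Int) : Prop := out = heap_increase_key_alt A i key
instance (A : List Int) (i : Int) (key : Int) (out : List Int) : Decidable (Spec_heap_increase_key A i key out) := by unfold Spec_heap_increase_key; infer_instance

-- ===== CLAIM (what is proved, stated in full; the proofs are below) =====
def Claim_equal_heap_increase_key : Prop := ∀ (A : List Int) (i : Int) (key : Int), Dom_heap_increase_key A i key → Pre_heap_increase_key A i key → Spec_heap_increase_key A i key (heap_increase_key A i key)

-- ===== LEMMAS AND PROOFS =====

lemma pvFloordiv3_nonneg (i : Int) (h : 0 < i) : 0 ≤ PySem.Int.floordiv i 3 := by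
  rw [PySem.Int.floordiv_eq_ediv_of_pos (by omega)]
  omega

-- proof-only intermediate: the hole/shift sift-up loop
def shiftLoop (A : List Int) (j : Int) (key : Int) : List Int :=
  if h : 0 < j then
    let p := PySem.Int.floordiv j 3
    if PySem.List.pyGetD A p 0 < key then
      shiftLoop (PySem.List.pySetD A j (PySem.List.pyGetD A p 0)) p key
    else PySem.List.pySetD A j key
  else PySem.List.pySetD A j key
termination_by j.toNat
decreasing_by exact pvFloordiv3_lt j h

-- A's swap loop on the array with key already written at j = the shift loop
lemma heapLoop_eq (n : Nat) : ∀ (A : List Int) (j key : Int), j.toNat ≤ n →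
    (0 < j → j < (A.length : Int)) →
    heapLoopA (PySem.List.pySetD A j key) j = shiftLoop A j key := by
  induction n with
  | zero =>
    intro A j key hle _
    have hj : ¬ 0 < j := by omega
    rw [heapLoopA, shiftLoop]
    simp [hj]
  | succ n ih =>
    intro A j key hle hrange
    by_cases hj : 0 < j
    · have hlen : j < (A.length : Int) := hrange hj
      have hp0 : 0 ≤ PySem.Int.floordiv j 3 := pvFloordiv3_nonneg j hj
      have hplt : (PySem.Int.floordiv j 3).toNat < j.toNat := pvFloordiv3_lt j hj
      set p := PySem.Int.floordiv j 3 with hpdef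
      have hpj : p ≠ j := by omega
      have hj0 : (0:Int) ≤ j := by omega
      have hget_j : PySem.List.pyGetD (PySem.List.pySetD A j key) j 0 = key := by
        rw [PySem.List.pySetD_of_nonneg _ _ hj0,
            PySem.List.pyGetD_eq_getElem _ _ hj0 (by simpa using hlen)]
        simp
      have hget_p : PySem.List.pyGetD (PySem.List.pySetD A j key) p 0
          = PySem.List.pyGetD A p 0 := by
        rw [PySem.List.pySetD_of_nonneg _ _ hj0]
        have hplen : p < (A.length : Int) := by omega
        rw [PySem.List.pyGetD_eq_getElem _ _ hp0 (by simpa using hplen),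
            PySem.List.pyGetD_eq_getElem _ _ hp0 (by simpa using hplen)]
        rw [List.getElem_set_ne (by omega)]
      rw [heapLoopA, shiftLoop]
      simp only [hj, dite_true, ← hpdef, hget_j, hget_p]
      by_cases hcmp : PySem.List.pyGetD A p 0 < key
      · simp only [hcmp, if_true]
        have hrw : PySem.List.pySetD
              (PySem.List.pySetD (PySem.List.pySetD A j key) p key) j
              (PySem.List.pyGetD A p 0)
            = PySem.List.pySetD (PySem.List.pySetD A j (PySem.List.pyGetD A p 0)) p key := by
          rw [PySem.List.pySetD_of_nonneg _ _ hj0,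
              PySem.List.pySetD_of_nonneg _ _ hp0,
              PySem.List.pySetD_of_nonneg _ _ hj0,
              PySem.List.pySetD_of_nonneg _ _ hj0,
              PySem.List.pySetD_of_nonneg _ _ hp0]
          rw [List.set_comm _ _ (by omega), List.set_set]
        rw [hrw]
        exact ih (PySem.List.pySetD A j (PySem.List.pyGetD A p 0)) p key (by omega)
          (fun _ => by
            rw [PySem.List.pySetD_of_nonneg _ _ hj0]
            simp only [List.length_set]
            omega)
      · simp [hcmp]
    · rw [heapLoopA, shiftLoop]
      simp [hj]

lemma pvChain_mem_bound (n : Nat) : ∀ (p : Int), p.toNat ≤ n → 0 ≤ p →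
    ∀ c ∈ pvChain p, 0 ≤ c ∧ c ≤ p := by
  induction n with
  | zero =>
    intro p hle hp0 c hc
    have hp : ¬ 0 < p := by omega
    rw [pvChain] at hc
    simp [hp] at hc
    omega
  | succ n ih =>
    intro p hle hp0 c hc
    by_cases hp : 0 < p
    · rw [pvChain] at hc
      simp only [hp, dite_true, List.mem_cons] at hc
      rcases hc with rfl | hc
      · omega
      · have h3 := pvFloordiv3_lt p hp
        have h30 := pvFloordiv3_nonneg p hp
        have := ih (PySem.Int.floordiv p 3) (by omega) h30 c hc
        omega
    · rw [pvChain] at hc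
      simp [hp] at hc
      omega

lemma pvCut_congr (A A' : List Int) (key : Int) :
    ∀ chain : List Int, (∀ c ∈ chain, PySem.List.pyGetD A' c 0 = PySem.List.pyGetD A c 0) →
    pvCut A' chain key = pvCut A chain key := by
  intro chain
  induction chain with
  | nil => intro _; rfl
  | cons c0 rest ih =>
    intro h
    cases rest with
    | nil => rfl
    | cons c1 rest' =>
      rw [pvCut, pvCut, h c1 (by simp), ih (fun c hc => h c (by simp [hc]))]

lemma pyGetD_set_ne (A : List Int) (j c v : Int) (hj : 0 ≤ j) (hc : 0 ≤ c) (hne : c ≠ j) :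
    PySem.List.pyGetD (PySem.List.pySetD A j v) c 0 = PySem.List.pyGetD A c 0 := by
  rw [PySem.List.pySetD_of_nonneg _ _ hj]
  by_cases h : c < (A.length : Int)
  · rw [PySem.List.pyGetD_eq_getElem _ _ hc (by simpa using h),
        PySem.List.pyGetD_eq_getElem _ _ hc (by simpa using h)]
    rw [List.getElem_set_ne (by omega)]
  · have h1 : PySem.List.pyGet? (A.set j.toNat v) c = none := by
      rw [PySem.List.pyGet?_eq_none_iff]
      unfold PySem.Raise.InRange
      simp only [List.length_set]
      omega
    have h2 : PySem.List.pyGet? A c = none := by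
      rw [PySem.List.pyGet?_eq_none_iff]
      unfold PySem.Raise.InRange
      omega
    simp [PySem.List.pyGetD, h1, h2]

-- head of the ancestor chain
lemma pvChain_head (j : Int) : ∃ rest, pvChain j = j :: rest := by
  by_cases h : 0 < j
  · rw [pvChain]; simp [h]
  · rw [pvChain]; simp [h]

-- B's three staged passes = the shift loop
lemma staged_eq (n : Nat) : ∀ (A : List Int) (j key : Int), j.toNat ≤ n →
    PySem.List.pySetD (pvShift A (pvChain j) (pvCut A (pvChain j) key))
      (PySem.List.pyGetD (pvChain j) ((pvCut A (pvChain j) key : Nat) : Int) 0) key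
    = shiftLoop A j key := by
  induction n with
  | zero =>
    intro A j key hle
    have hj : ¬ 0 < j := by omega
    rw [pvChain, shiftLoop]
    simp [hj, pvCut, pvShift, PySem.List.pyGetD_zero_cons]
  | succ n ih =>
    intro A j key hle
    by_cases hj : 0 < j
    · have hp0 : 0 ≤ PySem.Int.floordiv j 3 := pvFloordiv3_nonneg j hj
      have hplt : (PySem.Int.floordiv j 3).toNat < j.toNat := pvFloordiv3_lt j hj
      set p := PySem.Int.floordiv j 3 with hpdef
      obtain ⟨rest, hrest⟩ := pvChain_head p
      have hchain : pvChain j = j :: p :: rest := by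
        rw [pvChain]
        simp only [hj, dite_true]
        rw [← hpdef, hrest]
      rw [hchain, shiftLoop]
      simp only [hj, dite_true, ← hpdef]
      by_cases hcmp : PySem.List.pyGetD A p 0 < key
      · simp only [hcmp, if_true]
        set k' := pvCut A (p :: rest) key with hk'
        have hcut : pvCut A (j :: p :: rest) key = k' + 1 := by
          rw [pvCut]
          simp only [hcmp, if_true]
          rw [hk']
        set A' := PySem.List.pySetD A j (PySem.List.pyGetD A p 0) with hA'
        -- values at chain elements are unchanged by the write at j
        have hunch : ∀ c ∈ p :: rest, PySem.List.pyGetD A' c 0 = PySem.List.pyGetD A c 0 := by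
          intro c hc
          have hb := pvChain_mem_bound p.toNat p le_rfl hp0 c (hrest ▸ hc)
          exact pyGetD_set_ne A j c _ (by omega) hb.1 (by omega)
        have hcut' : pvCut A' (p :: rest) key = k' :=
          pvCut_congr A A' key (p :: rest) hunch
        have ihp := ih A' p key (by omega)
        rw [hrest, hcut'] at ihp
        have hshift : pvShift A (j :: p :: rest) (k' + 1) = pvShift A' (p :: rest) k' := by
          rw [pvShift]
        have hidx : PySem.List.pyGetD (j :: p :: rest) ((k' + 1 : Nat) : Int) 0
            = PySem.List.pyGetD (p :: rest) ((k' : Nat) : Int) 0 := by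
          rw [PySem.List.pyGetD_natCast, PySem.List.pyGetD_natCast]
          simp [List.getD]
        rw [hcut, hshift, hidx]
        exact ihp
      · simp only [hcmp, if_false]
        have hcut : pvCut A (j :: p :: rest) key = 0 := by
          rw [pvCut]; simp [hcmp]
        rw [hcut]
        simp [pvShift, PySem.List.pyGetD_zero_cons]
    · have hj' : ¬ 0 < j := hj
      rw [pvChain, shiftLoop]
      simp [hj', pvCut, pvShift, PySem.List.pyGetD_zero_cons]

-- ===== VERDICT (by name: the statement is the Claim_ definition above) =====
theorem heap_increase_key_spec : Claim_equal_heap_increase_key := by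
  intro A i key _ hpre
  obtain ⟨hin, hle⟩ := hpre
  unfold Spec_heap_increase_key heap_increase_key heap_increase_key_alt
  obtain ⟨v, hv⟩ : ∃ v, PySem.List.pyGet? A i = some v := by
    cases h : PySem.List.pyGet? A i with
    | none => exact absurd hin (by rwa [PySem.List.pyGet?_eq_none_iff] at h)
    | some v => exact ⟨v, rfl⟩
  rw [hv]
  have hvle : v ≤ key := by
    have : PySem.List.pyGetD A i 0 = v := by
      simp [PySem.List.pyGetD, hv]
    omega
  have hng : ¬ v > key := by omega
  simp only [hng, if_false]
  rw [staged_eq i.toNat A i key le_rfl]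
  exact heapLoop_eq i.toNat A i key le_rfl (fun _ => by
    unfold PySem.Raise.InRange at hin
    omega)
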